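-- pv_equiv track=rewrite | github.com/randysim/news-to-go | backend/modules/video/clean.py | clean_titles
-- ===== SOURCE A (Python) =====
-- def clean_titles(text):
--     """
--     Removes periods from common titles like Mr., Ms., Dr., etc.
--
--     Args:
--         text (str): The input text to clean
--
--     Returns:
--         str: Text with periods removed from common titles
--     """
--     # List of common titles with periods
--     titles_with_periods = [
--         "Mr.", "Ms.", "Mrs.", "Dr.", "Prof.", "Rev.", "Hon.",
--         "Capt.", "Lt.", "Sgt.", "Col.", "Gen.", "Cmdr.", "Gov."
--     ]
--
--     # List of same titles without periods
--     titles_without_periods = [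
--         "Mr", "Ms", "Mrs", "Dr", "Prof", "Rev", "Hon",
--         "Capt", "Lt", "Sgt", "Col", "Gen", "Cmdr", "Gov"
--     ]
--
--     # Create a dictionary for replacement
--     replacement_dict = dict(zip(titles_with_periods, titles_without_periods))
--
--     # Replace each title
--     for title_with_period, title_without_period in replacement_dict.items():
--         # Use word boundaries to ensure we only match complete titles
--         text = text.replace(title_with_period + " ", title_without_period + " ")
--
--     return text
-- ===== SOURCE B (Python) =====
-- # Single left-to-right scan instead of 14 sequential full-string .replace() passes.
-- _STEMS = ("Mr", "Ms", "Mrs", "Dr", "Prof", "Rev", "Hon",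
--           "Capt", "Lt", "Sgt", "Col", "Gen", "Cmdr", "Gov")
--
-- def clean_titles(text):
--     """
--     Removes periods from common titles in one pass: whenever a title stem
--     plus period plus space starts at the current position, emit the stem
--     and the space and skip past the match; otherwise copy one character.
--     """
--     out = []
--     i = 0
--     n = len(text)
--     while i < n:
--         for stem in _STEMS:
--             if text.startswith(stem + ". ", i):
--                 out.append(stem + " ")
--                 i += len(stem) + 2
--                 break
--         else:
--             out.append(text[i])
--             i += 1
--     return "".join(out)
-- ===== Notes on version B (the rewrite author's own statement) =====
-- stated objective: alternative
-- what changed: A makes 14 sequential full-string str.replace passes, one per title; B makes a single left-to-right scan that at each position either consumes one matching title abbreviation, emitting the title without its period, or copies one character.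
import Mathlib
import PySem

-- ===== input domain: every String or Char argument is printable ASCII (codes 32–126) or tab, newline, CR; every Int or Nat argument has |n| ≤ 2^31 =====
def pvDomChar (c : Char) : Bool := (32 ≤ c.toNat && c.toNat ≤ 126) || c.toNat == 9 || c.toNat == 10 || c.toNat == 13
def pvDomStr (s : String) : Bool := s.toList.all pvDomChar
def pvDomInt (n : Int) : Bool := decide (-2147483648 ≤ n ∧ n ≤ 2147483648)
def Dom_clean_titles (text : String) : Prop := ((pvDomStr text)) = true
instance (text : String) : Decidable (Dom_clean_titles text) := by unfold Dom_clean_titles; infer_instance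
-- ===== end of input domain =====

-- B replaces A's 14 sequential full-string replace passes by one left-to-right scan; proven equal on all inputs.


-- ===== PORT A =====
def titlesWithPeriods : List String :=
  ["Mr.", "Ms.", "Mrs.", "Dr.", "Prof.", "Rev.", "Hon.",
   "Capt.", "Lt.", "Sgt.", "Col.", "Gen.", "Cmdr.", "Gov."]

def titlesWithoutPeriods : List String :=
  ["Mr", "Ms", "Mrs", "Dr", "Prof", "Rev", "Hon",
   "Capt", "Lt", "Sgt", "Col", "Gen", "Cmdr", "Gov"]

def replacementDict : PySem.Dict String String :=
  PySem.Dict.ofList (titlesWithPeriods.zip titlesWithoutPeriods)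

def clean_titles (text : String) : String :=
  (PySem.Dict.items replacementDict).foldl
    (fun t p => PySem.Str.replace t (p.1 ++ " ") (p.2 ++ " ")) text

-- ===== PORT B =====
-- the tuple _STEMS of Source B, as char lists
def titleStems : List (List Char) :=
  [['M','r'], ['M','s'], ['M','r','s'], ['D','r'], ['P','r','o','f'], ['R','e','v'],
   ['H','o','n'], ['C','a','p','t'], ['L','t'], ['S','g','t'], ['C','o','l'],
   ['G','e','n'], ['C','m','d','r'], ['G','o','v']]

-- the while-loop of Source B: the index i becomes the remaining suffix, fuel = n - i
-- (n = len(text) as in Source B); the inner for/break/else is List.find?;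
-- out.append/"".join is list append
def altGo : Nat → List Char → List Char
  | _, [] => []
  | 0, _ :: _ => []
  | fuel + 1, c :: t =>
    match titleStems.find? (fun st => List.isPrefixOf (st ++ ['.', ' ']) (c :: t)) with
    | some st => (st ++ [' ']) ++ altGo fuel (t.drop (st.length + 1))
    | none => c :: altGo fuel t

def clean_titles_alt (text : String) : String :=
  String.ofList (altGo text.toList.length text.toList)

-- ===== PRECONDITION & SPEC =====
def Spec_clean_titles (text : String) (out : String) : Prop := out = clean_titles_alt text
instance (text : String) (out : String) : Decidable (Spec_clean_titles text out) := by unfold Spec_clean_titles; infer_instance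

-- ===== CLAIM (what is proved, stated in full; the proofs are below) =====
def Claim_equal_clean_titles : Prop := ∀ (text : String), Dom_clean_titles text → Spec_clean_titles text (clean_titles text)

-- ===== LEMMAS AND PROOFS =====

-- patL appends period-then-space to a stem; repL appends just the space
def patL (st : List Char) : List Char := st ++ ['.', ' ']
def repL (st : List Char) : List Char := st ++ [' ']

-- one str.replace pass, written as a plain scan (proof-side model of PySem.Chars.replace)
def myRepl (old new : List Char) : List Char → List Char
  | [] => []
  | c :: t =>
    if List.isPrefixOf old (c :: t) then new ++ myRepl old new (t.drop (old.length - 1))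
    else c :: myRepl old new t
termination_by l => l.length
decreasing_by
  · simp only [List.length_cons, List.length_drop]
    omega
  · simp

def stepM (l : List Char) (st : List Char) : List Char := myRepl (patL st) (repL st) l

lemma myRepl_nil (old new : List Char) : myRepl old new [] = [] := by simp [myRepl]

lemma myRepl_not {old : List Char} (new : List Char) {c : Char} {t : List Char}
    (h : ¬ old <+: c :: t) : myRepl old new (c :: t) = c :: myRepl old new t := by
  rw [myRepl]
  simp [List.isPrefixOf_iff_prefix, h]

lemma myRepl_matched {old : List Char} (new : List Char) (hne : old ≠ []) (rest : List Char) :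
    myRepl old new (old ++ rest) = new ++ myRepl old new rest := by
  obtain ⟨o, ot, rfl⟩ : ∃ o ot, old = o :: ot := by
    cases old with
    | nil => exact absurd rfl hne
    | cons o ot => exact ⟨o, ot, rfl⟩
  rw [show (o :: ot) ++ rest = o :: (ot ++ rest) from rfl, myRepl]
  have hp : List.isPrefixOf (o :: ot) (o :: (ot ++ rest)) = true := by
    simp [List.isPrefixOf_iff_prefix]
  rw [if_pos hp]
  simp

lemma go_eq (old new : List Char) (hne : old ≠ []) :
    ∀ (fuel : Nat) (l acc : List Char), l.length ≤ fuel →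
      PySem.Chars.replace.go old new fuel l acc = acc.reverse ++ myRepl old new l := by
  intro fuel
  induction fuel with
  | zero =>
    intro l acc hl
    have : l = [] := by cases l <;> simp_all
    subst this
    simp [PySem.Chars.replace.go, myRepl_nil]
  | succ n ih =>
    intro l acc hl
    cases l with
    | nil => simp [PySem.Chars.replace.go, myRepl_nil]
    | cons c t =>
      rw [PySem.Chars.replace.go]
      by_cases hp : List.isPrefixOf old (c :: t)
      · rw [if_pos hp]
        have hone : 1 ≤ old.length := by
          cases old with
          | nil => exact absurd rfl hne
          | cons o ot => simp
        have hlen : (List.drop old.length (c :: t)).length ≤ n := by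
          simp only [List.length_drop, List.length_cons] at *
          omega
        rw [ih _ _ hlen]
        rw [myRepl, if_pos hp]
        have hdrop : List.drop old.length (c :: t) = t.drop (old.length - 1) := by
          obtain ⟨o, ot, rfl⟩ : ∃ o ot, old = o :: ot := by
            cases old with
            | nil => exact absurd rfl hne
            | cons o ot => exact ⟨o, ot, rfl⟩
          simp
        rw [hdrop]
        simp [List.reverse_append]
      · rw [if_neg hp]
        have hlen : t.length ≤ n := by simp at hl; omega
        rw [ih _ _ hlen]
        rw [myRepl, if_neg hp]
        simp

lemma replace_eq_myRepl (old new : List Char) (hne : old ≠ []) (l : List Char) :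
    PySem.Chars.replace l old new = myRepl old new l := by
  rw [PySem.Chars.replace]
  have hemp : old.isEmpty = false := by simp [hne]
  rw [hemp]
  simp only [Bool.false_eq_true, if_false]
  rw [go_eq old new hne l.length l [] le_rfl]
  simp

-- no new match is created at a fixed head position: if q avoids the replacement's
-- head letter and q is a prefix of the replaced string, it was a prefix already
lemma nc (U : Char) (old new : List Char) (hn : new.head? = some U) :
    ∀ (n : Nat) (l q : List Char), U ∉ q → l.length ≤ n →
      q <+: myRepl old new l → q <+: l := by
  intro n
  induction n with
  | zero =>
    intro l q _ hl hq
    have : l = [] := by cases l <;> simp_all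
    subst this
    rw [myRepl_nil] at hq
    simpa using hq
  | succ n ih =>
    intro l q hU hl hq
    cases l with
    | nil =>
      rw [myRepl_nil] at hq
      simpa using hq
    | cons c t =>
      by_cases hp : old <+: c :: t
      · have hp' : List.isPrefixOf old (c :: t) = true := by
          simpa [List.isPrefixOf_iff_prefix] using hp
        rw [myRepl, if_pos hp'] at hq
        cases q with
        | nil => exact List.nil_prefix
        | cons a q' =>
          obtain ⟨u, nrest, rfl⟩ : ∃ u nrest, new = u :: nrest := by
            cases new with
            | nil => simp at hn
            | cons u nrest => exact ⟨u, nrest, rfl⟩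
          have hu : u = U := by simpa using hn
          rw [List.cons_append, List.cons_prefix_cons] at hq
          have : U ∈ a :: q' := by
            rw [hq.1, hu]
            exact List.mem_cons_self
          exact absurd this hU
      · rw [myRepl_not _ hp] at hq
        cases q with
        | nil => exact List.nil_prefix
        | cons a q' =>
          rw [List.cons_prefix_cons] at hq
          obtain ⟨rfl, hq'⟩ := hq
          have hl' : t.length ≤ n := by simp at hl; omega
          have := ih t q' (fun h => hU (List.mem_cons_of_mem _ h)) hl' hq'
          rw [List.cons_prefix_cons]
          exact ⟨rfl, this⟩

-- a replace pass walks through a prefix it cannot match anywhere inside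
lemma pass (old new : List Char) :
    ∀ (pre : List Char),
      (∀ i, i < pre.length → ¬ old <+: pre.drop i ∧ ¬ pre.drop i <+: old) →
      ∀ rest, myRepl old new (pre ++ rest) = pre ++ myRepl old new rest := by
  intro pre
  induction pre with
  | nil => intro _ rest; simp
  | cons c pre' ih =>
    intro h rest
    have h0 := h 0 (by simp)
    simp only [List.drop_zero] at h0
    have hnp : ¬ old <+: (c :: pre') ++ rest := by
      intro hcontra
      rcases List.prefix_or_prefix_of_prefix hcontra (List.prefix_append (c :: pre') rest) with
        h1 | h1
      · exact h0.1 h1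
      · exact h0.2 h1
    rw [show (c :: pre') ++ rest = c :: (pre' ++ rest) from rfl] at hnp ⊢
    rw [myRepl_not _ hnp]
    rw [ih (fun i hi => h (i + 1) (by simp only [List.length_cons]; omega)) rest]
    rfl

-- concrete facts about the 14 stems (checked by decide)
lemma stems_ne_nil : ∀ st ∈ titleStems, st ≠ [] := by decide
lemma condA : ∀ st ∈ titleStems, ∀ st' ∈ titleStems, st'.headD 'x' ∉ (patL st).drop 1 := by decide
lemma condB : ∀ st ∈ titleStems, ∀ st' ∈ titleStems, st ≠ st' →
    ∀ i, i < (patL st).length → ¬ patL st' <+: (patL st).drop i ∧ ¬ (patL st).drop i <+: patL st' := by decide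
lemma condC : ∀ st ∈ titleStems, ∀ st' ∈ titleStems,
    ∀ i, i < (repL st).length → ¬ patL st' <+: (repL st).drop i ∧ ¬ (repL st).drop i <+: patL st' := by decide
lemma nodupStems : titleStems.Nodup := by decide

lemma foldl_stepM_nil : ∀ ss : List (List Char), List.foldl stepM [] ss = [] := by
  intro ss
  induction ss with
  | nil => rfl
  | cons st ss ih =>
    rw [List.foldl_cons, show stepM [] st = [] from myRepl_nil _ _]
    exact ih

lemma head_pass :
    ∀ (ss : List (List Char)), (∀ st ∈ ss, st ∈ titleStems) →
      ∀ (c : Char) (X : List Char), (∀ st ∈ ss, ¬ patL st <+: c :: X) →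
        List.foldl stepM (c :: X) ss = c :: List.foldl stepM X ss := by
  intro ss
  induction ss with
  | nil => intro _ _ _ _; rfl
  | cons st' ss' ih =>
    intro hss c X hc
    have h1 : ¬ patL st' <+: c :: X := hc st' List.mem_cons_self
    rw [List.foldl_cons, show stepM (c :: X) st' = c :: stepM X st' from myRepl_not _ h1,
      List.foldl_cons]
    apply ih (fun st h => hss st (List.mem_cons_of_mem _ h)) c (stepM X st')
    intro st hst hpre
    have hstS : st ∈ titleStems := hss st (List.mem_cons_of_mem _ hst)
    have hstS' : st' ∈ titleStems := hss st' List.mem_cons_self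
    obtain ⟨a, q, ha⟩ : ∃ a q, patL st = a :: q := by
      cases hpl : patL st with
      | nil => exact absurd hpl (by simp [patL])
      | cons a q => exact ⟨a, q, rfl⟩
    rw [ha, List.cons_prefix_cons] at hpre
    obtain ⟨rfl, hq⟩ := hpre
    obtain ⟨u, urest, hu⟩ : ∃ u urest, st' = u :: urest := by
      cases hst'' : st' with
      | nil => exact absurd hst'' (stems_ne_nil st' hstS')
      | cons u urest => exact ⟨u, urest, rfl⟩
    have hn : (repL st').head? = some (st'.headD 'x') := by rw [hu]; rfl
    have hqU : st'.headD 'x' ∉ q := by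
      have := condA st hstS st' hstS'
      rw [ha] at this
      simpa using this
    have hq2 : q <+: myRepl (patL st') (repL st') X := hq
    have hqX : q <+: X :=
      nc (st'.headD 'x') (patL st') (repL st') hn X.length X q hqU le_rfl hq2
    exact hc st (List.mem_cons_of_mem _ hst)
      (by rw [ha, List.cons_prefix_cons]; exact ⟨rfl, hqX⟩)

lemma fold_pass :
    ∀ (ss : List (List Char)) (pre : List Char),
      (∀ st' ∈ ss, ∀ i, i < pre.length → ¬ patL st' <+: pre.drop i ∧ ¬ pre.drop i <+: patL st') →
      ∀ X, List.foldl stepM (pre ++ X) ss = pre ++ List.foldl stepM X ss := by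
  intro ss
  induction ss with
  | nil => intro _ _ _; rfl
  | cons st' ss' ih =>
    intro pre h X
    rw [List.foldl_cons, List.foldl_cons,
      show stepM (pre ++ X) st' = pre ++ stepM X st' from
        pass (patL st') (repL st') pre (h st' List.mem_cons_self) X]
    exact ih pre (fun st hst => h st (List.mem_cons_of_mem _ hst)) (stepM X st')

lemma main_eq : ∀ (n : Nat) (l : List Char), l.length ≤ n →
    List.foldl stepM l titleStems = altGo n l := by
  intro n
  induction n with
  | zero =>
    intro l hl
    have : l = [] := by cases l <;> simp_all
    subst this
    rw [foldl_stepM_nil, altGo]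
  | succ n ih =>
    intro l hl
    cases l with
    | nil => rw [foldl_stepM_nil, altGo]
    | cons c t =>
      cases hf : titleStems.find? (fun st => List.isPrefixOf (st ++ ['.', ' ']) (c :: t)) with
      | none =>
        have hall : ∀ st ∈ titleStems, ¬ patL st <+: c :: t := by
          intro st hst hp
          have hfalse := List.find?_eq_none.mp hf st hst
          simp only [List.isPrefixOf_iff_prefix] at hfalse
          rw [show patL st = st ++ ['.', ' '] from rfl] at hp
          simp [hp] at hfalse
        rw [head_pass titleStems (fun _ h => h) c t hall,
          ih t (by simp only [List.length_cons] at hl; omega)]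
        simp only [altGo, hf]
      | some k =>
        have hkmem : k ∈ titleStems := List.mem_of_find?_eq_some hf
        have hkp : patL k <+: c :: t := by
          have := List.find?_some hf
          simp only [List.isPrefixOf_iff_prefix] at this
          exact this
        obtain ⟨r, hr⟩ := hkp
        obtain ⟨S₁, S₂, hS⟩ := List.append_of_mem hkmem
        have hnd := nodupStems
        rw [hS, List.nodup_append] at hnd
        have hk1 : k ∉ S₁ := by
          intro hk
          exact hnd.2.2 k hk k (by simp) rfl
        have hlen := congrArg List.length hr
        simp only [patL, List.length_append, List.length_cons, List.length_nil] at hlen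
        simp only [List.length_cons] at hl
        have lens : r.length ≤ n := by omega
        have hmem1 : ∀ st ∈ S₁, st ∈ titleStems := fun st h => by
          rw [hS]; exact List.mem_append_left _ h
        have hmem2 : ∀ st ∈ S₂, st ∈ titleStems := fun st h => by
          rw [hS]; exact List.mem_append_right _ (List.mem_cons_of_mem _ h)
        have hrest : t.drop (k.length + 1) = r := by
          have hdrop := congrArg (List.drop (k.length + 2)) hr
          rw [show k.length + 2 = (patL k).length from by
              simp [patL]] at hdrop
          rw [List.drop_left] at hdrop
          rw [show (patL k).length = k.length + 1 + 1 from by simp [patL]] at hdrop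
          rw [List.drop_succ_cons] at hdrop
          exact hdrop.symm
        simp only [altGo, hf, hrest]
        have hrep : k ++ [' '] = repL k := rfl
        rw [hrep]
        calc List.foldl stepM (c :: t) titleStems
            = List.foldl stepM (patL k ++ r) (S₁ ++ k :: S₂) := by rw [hr, hS]
          _ = List.foldl stepM (List.foldl stepM (patL k ++ r) S₁) (k :: S₂) := by
                rw [List.foldl_append]
          _ = List.foldl stepM (patL k ++ List.foldl stepM r S₁) (k :: S₂) := by
                rw [fold_pass S₁ (patL k)
                  (fun st' h' => condB k hkmem st' (hmem1 st' h')
                    (fun he => hk1 (by rw [he]; exact h'))) r]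
          _ = List.foldl stepM (repL k ++ stepM (List.foldl stepM r S₁) k) S₂ := by
                rw [List.foldl_cons]
                congr 1
                exact myRepl_matched (repL k) (by simp [patL]) _
          _ = repL k ++ List.foldl stepM (stepM (List.foldl stepM r S₁) k) S₂ := by
                rw [fold_pass S₂ (repL k)
                  (fun st' h' => condC k hkmem st' (hmem2 st' h')) _]
          _ = repL k ++ List.foldl stepM r titleStems := by
                rw [hS, List.foldl_append, List.foldl_cons]
          _ = repL k ++ altGo n r := by rw [ih r lens]

lemma foldl_replace_eq : ∀ (ss : List (List Char)) (l : List Char),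
    List.foldl (fun l st => PySem.Chars.replace l (patL st) (repL st)) l ss =
      List.foldl stepM l ss := by
  intro ss
  induction ss with
  | nil => intro l; rfl
  | cons st ss ih =>
    intro l
    rw [List.foldl_cons, List.foldl_cons,
      replace_eq_myRepl (patL st) (repL st) (by simp [patL]) l]
    exact ih _

lemma a_eq (text : String) :
    clean_titles text =
      String.ofList (List.foldl (fun l st => PySem.Chars.replace l (patL st) (repL st))
        text.toList titleStems) := by
  have hI : PySem.Dict.items replacementDict =
      [("Mr.","Mr"), ("Ms.","Ms"), ("Mrs.","Mrs"), ("Dr.","Dr"), ("Prof.","Prof"),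
       ("Rev.","Rev"), ("Hon.","Hon"), ("Capt.","Capt"), ("Lt.","Lt"), ("Sgt.","Sgt"),
       ("Col.","Col"), ("Gen.","Gen"), ("Cmdr.","Cmdr"), ("Gov.","Gov")] := by decide
  unfold clean_titles
  rw [hI]
  simp only [titleStems, List.foldl, PySem.Str.replace, String.toList_ofList,
    show ("Mr." ++ " ").toList = patL ['M','r'] from by decide,
    show ("Mr" ++ " ").toList = repL ['M','r'] from by decide,
    show ("Ms." ++ " ").toList = patL ['M','s'] from by decide,
    show ("Ms" ++ " ").toList = repL ['M','s'] from by decide,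
    show ("Mrs." ++ " ").toList = patL ['M','r','s'] from by decide,
    show ("Mrs" ++ " ").toList = repL ['M','r','s'] from by decide,
    show ("Dr." ++ " ").toList = patL ['D','r'] from by decide,
    show ("Dr" ++ " ").toList = repL ['D','r'] from by decide,
    show ("Prof." ++ " ").toList = patL ['P','r','o','f'] from by decide,
    show ("Prof" ++ " ").toList = repL ['P','r','o','f'] from by decide,
    show ("Rev." ++ " ").toList = patL ['R','e','v'] from by decide,
    show ("Rev" ++ " ").toList = repL ['R','e','v'] from by decide,
    show ("Hon." ++ " ").toList = patL ['H','o','n'] from by decide,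
    show ("Hon" ++ " ").toList = repL ['H','o','n'] from by decide,
    show ("Capt." ++ " ").toList = patL ['C','a','p','t'] from by decide,
    show ("Capt" ++ " ").toList = repL ['C','a','p','t'] from by decide,
    show ("Lt." ++ " ").toList = patL ['L','t'] from by decide,
    show ("Lt" ++ " ").toList = repL ['L','t'] from by decide,
    show ("Sgt." ++ " ").toList = patL ['S','g','t'] from by decide,
    show ("Sgt" ++ " ").toList = repL ['S','g','t'] from by decide,
    show ("Col." ++ " ").toList = patL ['C','o','l'] from by decide,
    show ("Col" ++ " ").toList = repL ['C','o','l'] from by decide,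
    show ("Gen." ++ " ").toList = patL ['G','e','n'] from by decide,
    show ("Gen" ++ " ").toList = repL ['G','e','n'] from by decide,
    show ("Cmdr." ++ " ").toList = patL ['C','m','d','r'] from by decide,
    show ("Cmdr" ++ " ").toList = repL ['C','m','d','r'] from by decide,
    show ("Gov." ++ " ").toList = patL ['G','o','v'] from by decide,
    show ("Gov" ++ " ").toList = repL ['G','o','v'] from by decide]

-- ===== VERDICT (by name: the statement is the Claim_ definition above) =====
theorem clean_titles_spec : Claim_equal_clean_titles := by
  intro text _
  unfold Spec_clean_titles clean_titles_alt
  rw [a_eq, foldl_replace_eq, main_eq text.toList.length text.toList le_rfl]
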